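-- pv_equiv track=rewrite | github.com/AdamZhouSE/pythonHomework | Code/CodeRecords/2687/60620/257731.py | f
-- ===== SOURCE A (Python) =====
-- def f(n):
--     s=list(bin(n))
--     s.remove(s[0])
--     s.remove(s[0])
--     for i in range(len(s)):
--         if(i%2==0 and s[i]=='0'):
--             return False
--         if(i%2==1 and s[i]=='1'):
--             return False
--     return True
-- ===== SOURCE B (Python) =====
-- def f(n):
--     if n <= 0:
--         return False
--     while n > 1:
--         if n % 2 == (n // 2) % 2:
--             return False
--         n //= 2
--     return True
-- ===== Notes on version B (the rewrite author's own statement) =====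
-- stated objective: simpler
-- what changed: B replaces A's string surgery on bin(n) (list(), two remove() calls, an index-parity scan over characters) with a plain arithmetic loop that compares each bit n%2 with the next bit (n//2)%2 while halving n, after a single n<=0 guard.
import Mathlib
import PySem

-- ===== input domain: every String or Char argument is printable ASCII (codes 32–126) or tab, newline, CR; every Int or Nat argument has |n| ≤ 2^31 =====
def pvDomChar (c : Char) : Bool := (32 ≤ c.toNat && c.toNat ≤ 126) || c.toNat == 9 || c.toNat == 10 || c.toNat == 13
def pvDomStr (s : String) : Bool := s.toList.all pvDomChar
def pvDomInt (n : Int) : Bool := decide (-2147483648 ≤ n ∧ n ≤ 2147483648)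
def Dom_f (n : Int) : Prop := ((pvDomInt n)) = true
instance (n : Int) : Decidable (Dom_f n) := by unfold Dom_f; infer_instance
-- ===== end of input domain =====

-- B replaces A's character scan over bin(n) with an arithmetic loop comparing consecutive
-- bits (n%2 vs (n//2)%2) while halving n; same O(log n) cost, simpler (objective: simpler).

-- ===== PORT A =====
-- hand port of Python's bin(): optional '-' sign, '0b' prefix, then the binary digits
-- (exact for every Int: bin(0) = "0b0", bin(-m) = "-" + bin(m) for m > 0)
def binNat (n : Nat) : List Char :=
  if _h : n = 0 then []
  else binNat (n / 2) ++ [if n % 2 == 1 then '1' else '0']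

def pyBin (n : Int) : List Char :=
  if n < 0 then '-' :: '0' :: 'b' :: binNat (-n).toNat
  else if n = 0 then ['0', 'b', '0']
  else '0' :: 'b' :: binNat n.toNat

-- the `for i in range(len(s))` loop with `s[i]`, walking the list with the index i
def loopA : List Char → Nat → Bool
  | [], _ => true
  | c :: rest, i =>
    if i % 2 == 0 && c == '0' then false
    else if i % 2 == 1 && c == '1' then false
    else loopA rest (i + 1)

def f (n : Int) : Bool :=
  let s0 := pyBin n
  match PySem.List.pyGet? s0 0 with
  | none => false  -- unreachable: bin() never yields an empty string
  | some c0 =>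
    match PySem.List.remove? s0 c0 with
    | none => false
    | some s1 =>
      match PySem.List.pyGet? s1 0 with
      | none => false
      | some c1 =>
        match PySem.List.remove? s1 c1 with
        | none => false
        | some s2 => loopA s2 0

-- ===== PORT B =====
-- the `while n > 1` loop of Source B
def altLoop (n : Int) : Bool :=
  if _h : 1 < n then
    if PySem.Int.mod n 2 == PySem.Int.mod (PySem.Int.floordiv n 2) 2 then false
    else altLoop (PySem.Int.floordiv n 2)
  else true
termination_by n.toNat
decreasing_by
  rw [PySem.Int.floordiv_eq_ediv_of_pos (by omega : (0:Int) < 2)]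
  omega

def f_alt (n : Int) : Bool := if n ≤ 0 then false else altLoop n

-- ===== PRECONDITION & SPEC =====
def Spec_f (n : Int) (out : Bool) : Prop := out = f_alt n
instance (n : Int) (out : Bool) : Decidable (Spec_f n out) := by unfold Spec_f; infer_instance

-- ===== CLAIM (what is proved, stated in full; the proofs are below) =====
def Claim_equal_f : Prop := ∀ (n : Int), Dom_f n → Spec_f n (f n)

-- ===== LEMMAS AND PROOFS =====

-- Nat twin of altLoop, used only in the proofs
def natAlt (m : Nat) : Bool :=
  if 1 < m then
    if m % 2 = (m / 2) % 2 then false else natAlt (m / 2)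
  else true
termination_by m
decreasing_by omega

theorem fd2 (m : Nat) : PySem.Int.floordiv (↑m) 2 = ↑(m / 2) := by
  exact_mod_cast PySem.Int.floordiv_natCast m 2

theorem md2 (m : Nat) : PySem.Int.mod (↑m) 2 = ↑(m % 2) := by
  exact_mod_cast PySem.Int.mod_natCast m 2

theorem altLoop_natCast (m : Nat) : altLoop (↑m) = natAlt m := by
  induction m using Nat.strong_induction_on with
  | _ m ih =>
    rw [altLoop, natAlt]
    by_cases h : 1 < m
    · have h' : (1 : Int) < ↑m := by exact_mod_cast h
      rw [dif_pos h', if_pos h, fd2, md2 m, md2 (m / 2)]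
      simp only [beq_iff_eq, Nat.cast_inj]
      by_cases hc : m % 2 = m / 2 % 2
      · rw [if_pos hc, if_pos hc]
      · rw [if_neg hc, if_neg hc, ih (m / 2) (by omega)]
    · have h' : ¬ (1 : Int) < ↑m := by exact_mod_cast h
      rw [dif_neg h', if_neg h]

theorem binNat_zero : binNat 0 = [] := by rw [binNat]; simp

theorem binNat_one : binNat 1 = ['1'] := by
  rw [binNat]; norm_num [binNat_zero]

theorem natAlt_one : natAlt 1 = true := by rw [natAlt]; norm_num

theorem binNat_head (m : Nat) (hm : 1 ≤ m) : ∃ t, binNat m = '1' :: t := by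
  induction m using Nat.strong_induction_on with
  | _ m ih =>
    by_cases h : m / 2 = 0
    · have hm1 : m = 1 := by omega
      subst hm1
      exact ⟨[], binNat_one⟩
    · obtain ⟨t, ht⟩ := ih (m / 2) (by omega) (by omega)
      rw [binNat, dif_neg (by omega : ¬ m = 0), ht]
      exact ⟨t ++ [if m % 2 == 1 then '1' else '0'], rfl⟩

def okC (j : Nat) (c : Char) : Bool :=
  !((j % 2 == 0 && c == '0') || (j % 2 == 1 && c == '1'))

theorem loopA_append (s : List Char) (c : Char) :
    ∀ i, loopA (s ++ [c]) i = (loopA s i && okC (i + s.length) c) := by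
  induction s with
  | nil =>
    intro i
    rcases Nat.mod_two_eq_zero_or_one i with h0 | h0 <;> simp [loopA, okC, h0, Bool.beq_eq_decide_eq]
  | cons d s ihs =>
    intro i
    simp only [List.cons_append, loopA, List.length_cons]
    split_ifs with h1 h2
    · rfl
    · rfl
    · rw [ihs (i + 1)]
      congr 2
      omega

def expectedChar (j : Nat) : Char := if j % 2 == 0 then '1' else '0'

theorem binNat_ne_nil (m : Nat) (hm : 1 ≤ m) : binNat m ≠ [] := by
  obtain ⟨t, ht⟩ := binNat_head m hm
  simp [ht]

theorem main_lemma (m : Nat) (hm : 1 ≤ m) :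
    loopA (binNat m) 0 = natAlt m ∧
    (loopA (binNat m) 0 = true →
      (if m % 2 == 1 then '1' else '0') = expectedChar ((binNat m).length - 1)) := by
  induction m using Nat.strong_induction_on with
  | _ m ih =>
    by_cases h1 : m = 1
    · subst h1
      rw [binNat_one, natAlt_one]
      constructor
      · decide
      · intro _; decide
    · -- m ≥ 2
      have h2 : 2 ≤ m := by omega
      set q := m / 2 with hqdef
      have hq : 1 ≤ q := by omega
      have hbin : binNat m = binNat q ++ [if m % 2 == 1 then '1' else '0'] := by
        rw [binNat, dif_neg (by omega : ¬ m = 0)]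
      obtain ⟨ihA, ihL⟩ := ih q (by omega) hq
      have hlenpos : 1 ≤ (binNat q).length :=
        List.length_pos_iff.mpr (binNat_ne_nil q hq)
      have hstep : loopA (binNat m) 0 =
          (loopA (binNat q) 0 && okC ((binNat q).length) (if m % 2 == 1 then '1' else '0')) := by
        rw [hbin, loopA_append]
        simp
      have hNA : natAlt m = if m % 2 = q % 2 then false else natAlt q := by
        rw [natAlt, if_pos (by omega : 1 < m)]
      have hlenm : (binNat m).length = (binNat q).length + 1 := by
        rw [hbin]; simp
      cases hA : loopA (binNat q) 0 with
      | false =>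
        have hAq : natAlt q = false := by rw [← ihA]; exact hA
        constructor
        · rw [hstep, hA, hNA]
          simp [hAq]
        · intro habs
          rw [hstep, hA, Bool.false_and] at habs
          simp at habs
      | true =>
        have hAq : natAlt q = true := by rw [← ihA]; exact hA
        have hlast := ihL hA
        simp only [expectedChar] at hlast
        have hj1 : ((binNat q).length - 1) % 2 = 1 - (binNat q).length % 2 := by omega
        rw [hj1] at hlast
        have hr : m % 2 = 0 ∨ m % 2 = 1 := by omega
        have hs : q % 2 = 0 ∨ q % 2 = 1 := by omega
        have hjp : (binNat q).length % 2 = 0 ∨ (binNat q).length % 2 = 1 := by omega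
        constructor
        · rw [hstep, hA, hNA, hAq]
          rcases hjp with hj | hj <;> rcases hr with hr | hr <;> rcases hs with hs | hs <;>
            simp [okC, hj, hr, hs] at hlast ⊢
        · intro htr
          rw [hstep, hA, Bool.true_and] at htr
          rw [hlenm]
          simp only [Nat.add_sub_cancel, expectedChar]
          rcases hjp with hj | hj <;> rcases hr with hr | hr <;>
            simp [okC, hj, hr] at htr ⊢

theorem f_pos (m : Nat) (hm : 1 ≤ m) : f (↑m) = loopA (binNat m) 0 := by
  have hlt : ¬ ((m : Int) < 0) := by omega
  have hm0' : ¬ m = 0 := by omega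
  have hp : (0:Int) ≤ ((binNat m).length : Int) + 1 := by positivity
  simp [f, pyBin, hlt, hm0', hp, PySem.List.pyGet?, PySem.List.pyIdx?]

-- ===== VERDICT (by name: the statement is the Claim_ definition above) =====
theorem f_spec : Claim_equal_f := by
  intro n _
  unfold Spec_f
  rcases lt_trichotomy n 0 with hneg | hzero | hpos
  · -- negative: both sides are false
    have hm : 1 ≤ (-n).toNat := by omega
    obtain ⟨t, ht⟩ := binNat_head (-n).toNat hm
    have hfa : f_alt n = false := by simp [f_alt]; omega
    have hp1 : (0:Int) ≤ (t.length : Int) + 1 + 1 + 1 := by positivity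
    have hp2 : (0:Int) ≤ (t.length : Int) + 1 + 1 := by positivity
    have hp3 : (0:Int) ≤ (t.length : Int) + 1 := by positivity
    rw [hfa]
    simp [f, pyBin, hneg, ht, hp1, hp2, PySem.List.pyGet?, PySem.List.pyIdx?, loopA]
  · subst hzero; decide
  · have hm1 : 1 ≤ n.toNat := by omega
    have hcast : n = ((n.toNat : Nat) : Int) := by omega
    rw [hcast, f_pos n.toNat hm1, (main_lemma n.toNat hm1).1, ← altLoop_natCast]
    have hle : ¬ ((n.toNat : Int) ≤ 0) := by omega
    rw [f_alt, if_neg hle]
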